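-- pv_equiv track=rewrite | github.com/abdul-rasool/EDS-Effective-DNA-Storage-System | EDS.py | dec_to_ter
-- ===== SOURCE A (Python) =====
-- def dec_to_ter(num):
--     l = []
--     if num < 0:
--         return "- " + dec_to_ter(abs(num))
--     else:
--         while True:
--             num, reminder = divmod(num, 3)
--             l.append(reminder)
--             if num == 0:
--                 return l[::-1]
-- ===== SOURCE B (Python) =====
-- def dec_to_ter(num):
--     if num < 0:
--         return "- " + dec_to_ter(abs(num))
--     if num < 3:
--         return [num]
--     return dec_to_ter(num // 3) + [num % 3]
-- ===== Notes on version B (the rewrite author's own statement) =====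
-- stated objective: simpler
-- what changed: Replaces the explicit while-loop with accumulator list and final slice reversal by a direct structural recursion that builds the digits most-significant-first, so no reversal or accumulator is needed.
-- outside the precondition, e.g. on dec_to_ter(-1): A raises TypeError, B raises TypeError
import Mathlib
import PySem

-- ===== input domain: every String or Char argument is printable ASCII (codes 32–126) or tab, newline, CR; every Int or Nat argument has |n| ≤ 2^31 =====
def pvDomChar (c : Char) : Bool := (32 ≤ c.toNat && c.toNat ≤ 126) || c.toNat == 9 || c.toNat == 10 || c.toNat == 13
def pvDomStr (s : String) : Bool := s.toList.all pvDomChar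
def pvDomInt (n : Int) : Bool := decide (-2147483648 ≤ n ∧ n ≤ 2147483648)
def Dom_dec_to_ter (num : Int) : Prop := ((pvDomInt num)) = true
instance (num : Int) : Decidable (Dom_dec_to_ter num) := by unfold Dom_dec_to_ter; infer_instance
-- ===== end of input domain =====

-- B replaces A's while-loop + accumulator + final reversal by a direct recursion that
-- emits the digits most-significant-first (objective: simpler).

-- ===== PORT A =====
-- A's `while True` loop; the fuel argument only makes it total in Lean — for 0 ≤ num
-- the fuel num.toNat + 1 is never exhausted (the quotient shrinks each step).
def dec_to_ter_loop : Nat → Int → List Int → List Int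
  | 0, _, l => l.reverse
  | fuel + 1, num, l =>
    let q := PySem.Int.floordiv num 3
    let r := PySem.Int.mod num 3
    if q = 0 then (l ++ [r]).reverse else dec_to_ter_loop fuel q (l ++ [r])

-- On num < 0 A raises TypeError ("- " + list); that branch is excluded by Pre_ below.
def dec_to_ter (num : Int) : List Int :=
  if num < 0 then [] else dec_to_ter_loop (num.toNat + 1) num []

-- ===== PORT B =====
def dec_to_ter_alt_go (num : Int) : List Int :=
  if num < 3 then [num]
  else dec_to_ter_alt_go (PySem.Int.floordiv num 3) ++ [PySem.Int.mod num 3]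
termination_by num.toNat
decreasing_by
  have h3 : PySem.Int.floordiv num 3 = num / 3 :=
    PySem.Int.floordiv_eq_ediv_of_pos (by norm_num)
  rw [h3]; omega

-- On num < 0 B raises TypeError exactly like A; excluded by Pre_ below.
def dec_to_ter_alt (num : Int) : List Int :=
  if num < 0 then [] else dec_to_ter_alt_go num

-- ===== PRECONDITION & SPEC =====
-- Pre_ excludes num < 0, on which both Pythons raise TypeError ("- " + list).
def Pre_dec_to_ter (num : Int) : Prop := 0 ≤ num
instance (num : Int) : Decidable (Pre_dec_to_ter num) := by unfold Pre_dec_to_ter; infer_instance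
def pvWitness_dec_to_ter : Int := (5)

def Spec_dec_to_ter (num : Int) (out : List Int) : Prop := out = dec_to_ter_alt num
instance (num : Int) (out : List Int) : Decidable (Spec_dec_to_ter num out) := by unfold Spec_dec_to_ter; infer_instance

-- ===== CLAIM (what is proved, stated in full; the proofs are below) =====
def Claim_equal_dec_to_ter : Prop := ∀ (num : Int), Dom_dec_to_ter num → Pre_dec_to_ter num → Spec_dec_to_ter num (dec_to_ter num)

-- ===== LEMMAS AND PROOFS =====
theorem dec_to_ter_loop_eq (fuel : Nat) : ∀ (num : Int) (acc : List Int),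
    0 ≤ num → num < (fuel : Int) →
    dec_to_ter_loop fuel num acc = dec_to_ter_alt_go num ++ acc.reverse := by
  induction fuel with
  | zero => intro num acc h0 hlt; exfalso; omega
  | succ k ih =>
    intro num acc h0 hlt
    have hd : PySem.Int.floordiv num 3 = num / 3 :=
      PySem.Int.floordiv_eq_ediv_of_pos (by norm_num)
    have hm : PySem.Int.mod num 3 = num % 3 :=
      PySem.Int.mod_eq_emod_of_pos (by norm_num)
    by_cases hq : PySem.Int.floordiv num 3 = 0
    · have hnum3 : num < 3 := by rw [hd] at hq; omega
      rw [dec_to_ter_loop, dec_to_ter_alt_go]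
      simp only [hd, hm]
      rw [if_pos (show num / 3 = 0 by omega)]
      have hr : num % 3 = num := by omega
      simp [hnum3, hr]
    · have hnum3 : ¬ num < 3 := by rw [hd] at hq; omega
      have hq0 : 0 ≤ num / 3 := by omega
      have hqlt : num / 3 < (k : Int) := by omega
      rw [dec_to_ter_loop, dec_to_ter_alt_go]
      simp only [hq, if_false, hnum3]
      rw [ih (PySem.Int.floordiv num 3) _ (by rw [hd]; exact hq0) (by rw [hd]; exact hqlt)]
      simp [List.append_assoc]

-- ===== VERDICT (by name: the statement is the Claim_ definition above) =====
theorem dec_to_ter_spec : Claim_equal_dec_to_ter := by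
  intro num _ hpre
  unfold Spec_dec_to_ter dec_to_ter dec_to_ter_alt
  have hneg : ¬ num < 0 := by exact not_lt.mpr hpre
  rw [if_neg hneg, if_neg hneg,
    dec_to_ter_loop_eq (num.toNat + 1) num [] hpre (by omega)]
  simp
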